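-- pv_equiv track=rewrite | github.com/algorhythmer/programmers-meraro | 프로그래머스/2/87946. 피로도/피로도.py | solution
-- ===== SOURCE A (Python) =====
-- def solution(k, dungeons):
--     l = len(dungeons)
--     dp = [-1] * (1 << l)
--     dp[0] = k
--     answer = 0
--
--     for visited_bits in range(1<<l):
--         if dp[visited_bits] == -1 : continue
--
--         curr = bin(visited_bits).count('1')
--         answer = max(answer, curr)
--
--         for i in range(l):
--             if visited_bits & (1<<i): continue
--             if dp[visited_bits]  < dungeons[i][0]: continue
--             n = visited_bits | (1 << i)
--             dp[n] = max(dp[n], dp[visited_bits] - dungeons[i][1])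
--
--     return answer
-- ===== SOURCE B (Python) =====
-- def solution(k, dungeons):
--     l = len(dungeons)
--     memo = {}
--
--     def dfs(fatigue, visited):
--         if visited in memo:
--             return memo[visited]
--         best = 0
--         for i in range(l):
--             if not visited >> i & 1 and dungeons[i][0] <= fatigue:
--                 best = max(best, 1 + dfs(fatigue - dungeons[i][1], visited | 1 << i))
--         memo[visited] = best
--         return best
--
--     return dfs(k, 0)
-- ===== Notes on version B (the rewrite author's own statement) =====
-- stated objective: alternative
-- what changed: Replaces the bottom-up 2^l dp table with its -1 'unvisited' sentinel by a top-down memoized DFS over the visited bitmask; Pre_ admits the problem's natural domain (each dungeon a pair with cost <= required fatigue, or provably never enterable, or a start fatigue covering all positive costs, or start -1 with nothing enterable), outside which A raises IndexError on short dungeon lists or returns values shaped by the -1 sentinel accidentally skipping states whose fatigue is exactly -1 or negative.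
-- outside the precondition, e.g. on solution(3, [[1, 5], [-10, 0]]): A returns 1, B returns 2; on solution(-1, [[-1, -1]]): A returns 0, B returns 1; on solution(5, [[3]]): A raises IndexError, B raises IndexError
import Mathlib
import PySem

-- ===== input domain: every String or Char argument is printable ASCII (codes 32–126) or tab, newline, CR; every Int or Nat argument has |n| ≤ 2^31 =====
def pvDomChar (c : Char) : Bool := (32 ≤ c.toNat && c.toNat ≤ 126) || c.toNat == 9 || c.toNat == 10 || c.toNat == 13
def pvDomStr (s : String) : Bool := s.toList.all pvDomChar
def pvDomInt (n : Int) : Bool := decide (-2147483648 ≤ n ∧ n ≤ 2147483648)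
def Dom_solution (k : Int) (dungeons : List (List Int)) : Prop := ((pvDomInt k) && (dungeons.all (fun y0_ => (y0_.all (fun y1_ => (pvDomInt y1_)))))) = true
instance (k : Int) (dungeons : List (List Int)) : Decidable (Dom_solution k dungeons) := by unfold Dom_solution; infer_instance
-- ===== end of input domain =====

-- B replaces A's bottom-up 2^l dp table (with its -1 'unvisited' sentinel) by a top-down
-- memoized DFS over the visited bitmask (objective: alternative, same cost); equivalence is
-- claimed on the problem's natural domain stated in Pre_solution.

-- ===== PORT A =====
-- helper for `bin(visited_bits).count('1')`: number of 1-digits of the binary expansion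
-- (fuel-based so it reduces in the kernel; fuel n suffices since the argument halves)
def binGo : Nat → Nat → Nat
  | _, 0 => 0
  | 0, _ + 1 => 0
  | f + 1, n + 1 => (n + 1) % 2 + binGo f ((n + 1) / 2)

def binOnes (n : Nat) : Nat := binGo n n

-- body of `for i in range(l)` (dp is read live, exactly as Python does)
def aInner (ds : List (List Int)) (v : Int) (dp : List Int) (i : Int) : List Int :=
  if v.toNat &&& (1 <<< i.toNat) ≠ 0 then dp
  else if PySem.List.pyGetD dp v 0 < PySem.List.pyGetD (PySem.List.pyGetD ds i []) 0 0 then dp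
  else
    let n : Int := ((v.toNat ||| (1 <<< i.toNat) : Nat) : Int)
    PySem.List.pySetD dp n
      (max (PySem.List.pyGetD dp n 0)
           (PySem.List.pyGetD dp v 0 - PySem.List.pyGetD (PySem.List.pyGetD ds i []) 1 0))

-- body of `for visited_bits in range(1<<l)`; state = (dp, answer)
def aOuter (ds : List (List Int)) (l : Nat) (s : List Int × Int) (v : Int) : List Int × Int :=
  if PySem.List.pyGetD s.1 v 0 = -1 then s
  else
    let curr : Int := binOnes v.toNat
    ((PySem.List.pyRange 0 (l : Int) 1).foldl (aInner ds v) s.1, max s.2 curr)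

def solution (k : Int) (dungeons : List (List Int)) : Int :=
  let l := dungeons.length
  let dp := PySem.List.pySetD (List.replicate (1 <<< l) (-1 : Int)) 0 k
  ((PySem.List.pyRange 0 ((1 <<< l : Nat) : Int) 1).foldl (aOuter dungeons l) (dp, 0)).2

-- ===== PORT B =====
-- number of indices < l not yet visited (termination measure of the DFS)
def unvis (l : Nat) (vis : Nat) : Nat :=
  ((Finset.range l).filter (fun j => vis.testBit j = false)).card

theorem unvis_lt (l i vis : Nat) (hi : i < l) (h : (vis >>> i) &&& 1 = 0) :
    unvis l (vis ||| 1 <<< i) < unvis l vis := by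
  have hbit : vis.testBit i = false := by
    simp [Nat.testBit, Nat.and_comm, h]
  apply Finset.card_lt_card
  constructor
  · intro j hj
    simp only [Finset.mem_filter, Finset.mem_range] at hj ⊢
    refine ⟨hj.1, ?_⟩
    have := hj.2
    simp only [Nat.testBit_or, Bool.or_eq_false_iff] at this
    exact this.1
  · intro hsub
    have hmem : i ∈ (Finset.range l).filter (fun j => vis.testBit j = false) := by
      simp [Finset.mem_filter, Finset.mem_range, hi, hbit]
    have := hsub hmem
    simp only [Finset.mem_filter, Finset.mem_range, Nat.testBit_or] at this
    have h2 : (1 <<< i).testBit i = true := by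
      rw [Nat.shiftLeft_eq, one_mul]; exact Nat.testBit_two_pow_self
    rw [h2] at this
    simp at this

mutual
-- `def dfs(fatigue, visited)` of Source B; the memo dict is threaded through
def dfsM (ds : List (List Int)) (l : Nat) (fatigue : Int) (visited : Nat)
    (memo : PySem.Dict Nat Int) : Int × PySem.Dict Nat Int :=
  match memo.get? visited with
  | some v => (v, memo)
  | none =>
    let r := goM ds l fatigue visited 0 0 memo
    (r.1, r.2.insert visited r.1)
termination_by (unvis l visited, l + 1)

-- `for i in range(l)` of dfs, with the running `best`
def goM (ds : List (List Int)) (l : Nat) (fatigue : Int) (visited : Nat)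
    (i : Nat) (best : Int) (memo : PySem.Dict Nat Int) : Int × PySem.Dict Nat Int :=
  if h : i < l then
    if hc : (visited >>> i) &&& 1 = 0 ∧ (ds.getD i []).getD 0 0 ≤ fatigue then
      let r := dfsM ds l (fatigue - (ds.getD i []).getD 1 0) (visited ||| 1 <<< i) memo
      goM ds l fatigue visited (i + 1) (max best (1 + r.1)) r.2
    else goM ds l fatigue visited (i + 1) best memo
  else (best, memo)
termination_by (unvis l visited, l - i)
decreasing_by
  · exact Prod.Lex.left _ _ (unvis_lt l i visited h hc.1)
  · exact Prod.Lex.right _ (by omega)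
  · exact Prod.Lex.right _ (by omega)
end

def solution_alt (k : Int) (dungeons : List (List Int)) : Int :=
  (dfsM dungeons dungeons.length k 0 PySem.Dict.empty).1

-- ===== PRECONDITION & SPEC =====
-- Pre_ admits the problem's natural domain: each dungeon is either a pair
-- [required, cost] with cost ≤ required, or provably inert (its requirement exceeds the
-- start fatigue k and fatigue can never rise above k, each dungeon having a nonnegative
-- cost or an unreachable requirement); a start fatigue of exactly -1 is admitted when no
-- requirement is ≤ -1. Outside it A raises IndexError on short dungeon lists, or returns
-- values shaped by its -1 'unvisited' sentinel silently skipping every state whose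
-- fatigue is exactly -1 (and pruning moves into negative fatigue) — accidents of the dp
-- encoding that the natural backtracking does not reproduce. (A start fatigue covering
-- the positive part of all costs is also admitted: fatigue then stays nonnegative in any
-- order, so the sentinel never bites.)
def Pre_solution (k : Int) (dungeons : List (List Int)) : Prop :=
  (k = -1 ∧ ∀ d ∈ dungeons, 1 ≤ d.length ∧ -1 < d.getD 0 0) ∨
  (k ≠ -1 ∧ ∀ d ∈ dungeons,
    (2 ≤ d.length ∧ d.getD 1 0 ≤ d.getD 0 0) ∨
    (1 ≤ d.length ∧ k < d.getD 0 0 ∧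
      ∀ e ∈ dungeons, 0 ≤ e.getD 1 0 ∨ k < e.getD 0 0)) ∨
  ((dungeons.map (fun d => max (d.getD 1 0) 0)).sum ≤ k ∧ ∀ d ∈ dungeons, 2 ≤ d.length)
instance (k : Int) (dungeons : List (List Int)) : Decidable (Pre_solution k dungeons) := by
  unfold Pre_solution; infer_instance

def pvWitness_solution : Int × List (List Int) := (7, [[3, 1], [5, 2]])

def Spec_solution (k : Int) (dungeons : List (List Int)) (out : Int) : Prop :=
  out = solution_alt k dungeons
instance (k : Int) (dungeons : List (List Int)) (out : Int) : Decidable (Spec_solution k dungeons out) := by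
  unfold Spec_solution; infer_instance

-- ===== CLAIM (what is proved, stated in full; the proofs are below) =====
def Claim_equal_solution : Prop := ∀ (k : Int) (dungeons : List (List Int)), Dom_solution k dungeons → Pre_solution k dungeons → Spec_solution k dungeons (solution k dungeons)

-- ===== LEMMAS AND PROOFS =====

-- requirement / cost of dungeon i, and the total cost of a bitmask of dungeons
def reqOf (ds : List (List Int)) (i : Nat) : Int := (ds.getD i []).getD 0 0
def costOf (ds : List (List Int)) (i : Nat) : Int := (ds.getD i []).getD 1 0
def costS (ds : List (List Int)) (l : Nat) (m : Nat) : Int :=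
  ∑ i ∈ Finset.range l, if m.testBit i then costOf ds i else 0

-- `Chain f vis n`: from fatigue f with visited set vis, n more dungeons can be cleared,
-- entering a dungeon whenever fatigue covers its requirement
inductive Chain (ds : List (List Int)) (l : Nat) : Int → Nat → Nat → Prop
  | nil (f : Int) (vis : Nat) : Chain ds l f vis 0
  | cons {f : Int} {vis n : Nat} (i : Nat) (hi : i < l) (hb : vis.testBit i = false)
      (hr : reqOf ds i ≤ f)
      (htl : Chain ds l (f - costOf ds i) (vis ||| 1 <<< i) n) : Chain ds l f vis (n + 1)

-- `Proc m`: mask m is processed by A's outer loop (dp[m] ≠ -1 when its turn comes)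
inductive Proc (k : Int) (ds : List (List Int)) (l : Nat) : Nat → Prop
  | zero (h : k ≠ -1) : Proc k ds l 0
  | step {m : Nat} (i : Nat) (hm : Proc k ds l m) (hi : i < l) (hb : m.testBit i = false)
      (hr : reqOf ds i ≤ k - costS ds l m) (hge : 0 ≤ k - costS ds l m - costOf ds i) :
      Proc k ds l (m ||| 1 <<< i)

-- bounds supplied by Pre_solution, phrased on reqOf/costOf
def PreB (k : Int) (ds : List (List Int)) (l : Nat) : Prop :=
  ∀ i, i < l → costOf ds i ≤ reqOf ds i ∨
    (k < reqOf ds i ∧ ∀ j, j < l → 0 ≤ costOf ds j ∨ k < reqOf ds j)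

theorem getD_mem_of_lt (ds : List (List Int)) (i : Nat) (hi : i < ds.length) :
    ds.getD i [] ∈ ds := by
  rw [List.getD_eq_getElem?_getD, List.getElem?_eq_getElem hi]
  exact List.getElem_mem hi

theorem pre_preB (k : Int) (ds : List (List Int))
    (h : ∀ d ∈ ds, (2 ≤ d.length ∧ d.getD 1 0 ≤ d.getD 0 0) ∨
      (1 ≤ d.length ∧ k < d.getD 0 0 ∧ ∀ e ∈ ds, 0 ≤ e.getD 1 0 ∨ k < e.getD 0 0)) :
    PreB k ds ds.length := by
  intro i hi
  rcases h _ (getD_mem_of_lt ds i hi) with ⟨_, h2⟩ | ⟨_, h2, h3⟩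
  · exact Or.inl h2
  · exact Or.inr ⟨h2, fun j hj => h3 _ (getD_mem_of_lt ds j hj)⟩

-- ---------- generic bit lemmas ----------

theorem testBit_one_shift (i j : Nat) : (1 <<< i).testBit j = decide (j = i) := by
  rw [Nat.shiftLeft_eq, one_mul, Nat.testBit_two_pow]
  simp [eq_comm]

theorem or_shift_testBit (m i j : Nat) :
    (m ||| 1 <<< i).testBit j = (m.testBit j || decide (j = i)) := by
  rw [Nat.testBit_or, testBit_one_shift]

theorem or_shift_ne_zero (m i : Nat) : m ||| 1 <<< i ≠ 0 := by
  intro he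
  have := congrArg (fun x => x.testBit i) he
  simp [or_shift_testBit] at this

theorem lt_or_shift (m i : Nat) (hb : m.testBit i = false) : m < m ||| 1 <<< i := by
  rcases Nat.lt_or_ge m (m ||| 1 <<< i) with h | h
  · exact h
  · exfalso
    have he : m = m ||| 1 <<< i := le_antisymm Nat.left_le_or h
    have := congrArg (fun x => x.testBit i) he
    simp [or_shift_testBit, hb] at this

theorem or_shift_lt (m i l : Nat) (hm : m < 2 ^ l) (hi : i < l) : m ||| 1 <<< i < 2 ^ l := by
  apply Nat.or_lt_two_pow hm
  rw [Nat.shiftLeft_eq, one_mul]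
  exact Nat.pow_lt_pow_right (by omega) hi

theorem and_shift_eq_zero_iff (m i : Nat) : m &&& (1 <<< i) = 0 ↔ m.testBit i = false := by
  constructor
  · intro h
    have := congrArg (fun x => x.testBit i) h
    simp only [Nat.testBit_and, testBit_one_shift, Nat.zero_testBit] at this
    simpa using this
  · intro h
    apply Nat.eq_of_testBit_eq
    intro j
    simp only [Nat.testBit_and, testBit_one_shift, Nat.zero_testBit]
    by_cases hj : j = i
    · subst hj; simp [h]
    · simp [hj]

theorem shiftRight_and_one (m i : Nat) : (m >>> i) &&& 1 = 0 ↔ m.testBit i = false := by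
  rw [Nat.and_comm]
  constructor
  · intro h; simp [Nat.testBit, h]
  · intro h; simpa [Nat.testBit] using h

theorem or_shift_inj (v i i' : Nat) (hb : v.testBit i = false) (hb' : v.testBit i' = false)
    (he : v ||| 1 <<< i = v ||| 1 <<< i') : i = i' := by
  have h1 := congrArg (fun x => x.testBit i) he
  simp only [or_shift_testBit, hb, hb', Bool.false_or, decide_eq_decide] at h1
  exact h1.mp trivial

-- ---------- binOnes facts ----------

theorem binGo_congr : ∀ (n f f' : Nat), n ≤ f → n ≤ f' → binGo f n = binGo f' n := by
  intro n
  induction n using Nat.strong_induction_on with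
  | _ n ih =>
    intro f f' hf hf'
    match n, f, f' with
    | 0, f, f' => cases f <;> cases f' <;> rfl
    | n + 1, f + 1, f' + 1 =>
      simp only [binGo]
      rw [ih ((n + 1) / 2) (by omega) f f' (by omega) (by omega)]

theorem binOnes_rec (n : Nat) : binOnes n = n % 2 + binOnes (n / 2) := by
  match n with
  | 0 => rfl
  | n + 1 =>
    show binGo (n + 1) (n + 1) = _
    simp only [binGo]
    rw [binGo_congr ((n + 1) / 2) n ((n + 1) / 2) (by omega) (by omega)]
    rfl

theorem binOnes_sum : ∀ (w m : Nat), m < 2 ^ w →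
    binOnes m = ∑ j ∈ Finset.range w, if m.testBit j then 1 else 0 := by
  intro w
  induction w with
  | zero => intro m hm; interval_cases m; rfl
  | succ w ih =>
    intro m hm
    rw [Finset.sum_range_succ', binOnes_rec]
    have h2 : m / 2 < 2 ^ w := by
      have : (2:Nat) ^ (w + 1) = 2 ^ w * 2 := by ring
      omega
    have hbz : (if m.testBit 0 = true then (1:Nat) else 0) = m % 2 := by
      rw [Nat.testBit_zero]
      rcases Nat.mod_two_eq_zero_or_one m with h | h <;> simp [h]
    simp only [Nat.testBit_add_one]
    rw [← ih (m / 2) h2]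
    simp only [hbz]
    omega

theorem binOnes_zero : binOnes 0 = 0 := rfl

theorem binOnes_or (w m i : Nat) (hm : m < 2 ^ w) (hi : i < w) (hb : m.testBit i = false) :
    binOnes (m ||| 1 <<< i) = binOnes m + 1 := by
  rw [binOnes_sum w m hm, binOnes_sum w (m ||| 1 <<< i) (or_shift_lt m i w hm hi)]
  have hsplit : ∀ j ∈ Finset.range w,
      (if (m ||| 1 <<< i).testBit j then (1:Nat) else 0) =
      (if m.testBit j then 1 else 0) + (if j = i then 1 else 0) := by
    intro j _
    rw [or_shift_testBit]
    by_cases hj : j = i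
    · subst hj; simp [hb]
    · simp [hj]
  rw [Finset.sum_congr rfl hsplit, Finset.sum_add_distrib]
  congr 1
  rw [Finset.sum_ite_eq' (Finset.range w) i (fun _ => (1:Nat))]
  simp [hi]

-- ---------- costS facts ----------

theorem costS_zero (ds : List (List Int)) (l : Nat) : costS ds l 0 = 0 := by
  unfold costS
  simp [Nat.zero_testBit]

theorem costS_or (ds : List (List Int)) (l m i : Nat) (hi : i < l) (hb : m.testBit i = false) :
    costS ds l (m ||| 1 <<< i) = costS ds l m + costOf ds i := by
  unfold costS
  have hsplit : ∀ j ∈ Finset.range l,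
      (if (m ||| 1 <<< i).testBit j then costOf ds j else 0) =
      (if m.testBit j then costOf ds j else 0) + (if j = i then costOf ds j else 0) := by
    intro j _
    rw [or_shift_testBit]
    by_cases hj : j = i
    · subst hj; simp [hb]
    · simp [hj]
  rw [Finset.sum_congr rfl hsplit, Finset.sum_add_distrib]
  congr 1
  rw [Finset.sum_ite_eq' (Finset.range l) i (fun j => costOf ds j)]
  simp [hi]

-- ---------- Proc basics ----------

theorem Proc_lt (k : Int) (ds : List (List Int)) (l : Nat) (m : Nat) (h : Proc k ds l m) :
    m < 2 ^ l := by
  induction h with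
  | zero => exact Nat.two_pow_pos l
  | step i hm hi hb hr hge ih => exact or_shift_lt _ _ _ ih hi

theorem Proc_k_ne (k : Int) (ds : List (List Int)) (l : Nat) (m : Nat) (h : Proc k ds l m) :
    k ≠ -1 := by
  induction h with
  | zero h => exact h
  | step i hm hi hb hr hge ih => exact ih

-- ---------- B side: dfsM computes the maximal chain length ----------

def ChainInv (ds : List (List Int)) (l : Nat) (k0 : Int) (memo : PySem.Dict Nat Int) : Prop :=
  ∀ m v, memo.get? m = some v →
    0 ≤ v ∧ Chain ds l (k0 - costS ds l m) m v.toNat ∧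
    (∀ n, Chain ds l (k0 - costS ds l m) m n → (n : Int) ≤ v)

def DfsP (ds : List (List Int)) (l : Nat) (k0 f : Int) (vis : Nat)
    (memo : PySem.Dict Nat Int) : Prop :=
  0 ≤ (dfsM ds l f vis memo).1 ∧
  Chain ds l f vis (dfsM ds l f vis memo).1.toNat ∧
  (∀ n, Chain ds l f vis n → (n : Int) ≤ (dfsM ds l f vis memo).1) ∧
  ChainInv ds l k0 (dfsM ds l f vis memo).2

theorem goM_spec (ds : List (List Int)) (l : Nat) (k0 : Int) (vis : Nat) (f : Int)
    (hf : f = k0 - costS ds l vis)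
    (Hchild : ∀ vis' f' memo', unvis l vis' < unvis l vis →
        f' = k0 - costS ds l vis' → ChainInv ds l k0 memo' → DfsP ds l k0 f' vis' memo') :
    ∀ (t i : Nat) (best : Int) (memo : PySem.Dict Nat Int), l - i ≤ t →
      ChainInv ds l k0 memo → 0 ≤ best → Chain ds l f vis best.toNat →
      (0 ≤ (goM ds l f vis i best memo).1 ∧ best ≤ (goM ds l f vis i best memo).1 ∧
       Chain ds l f vis (goM ds l f vis i best memo).1.toNat ∧
       ChainInv ds l k0 (goM ds l f vis i best memo).2 ∧
       (∀ j n, i ≤ j → j < l → vis.testBit j = false → reqOf ds j ≤ f →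
          Chain ds l (f - costOf ds j) (vis ||| 1 <<< j) n →
          (n : Int) + 1 ≤ (goM ds l f vis i best memo).1)) := by
  intro t
  induction t with
  | zero =>
    intro i best memo hfuel hinv hb hch
    have hil : ¬ i < l := by omega
    rw [goM, dif_neg hil]
    refine ⟨hb, le_refl _, hch, hinv, ?_⟩
    intro j n hij hjl
    omega
  | succ t ih =>
    intro i best memo hfuel hinv hb hch
    by_cases hil : i < l
    · rw [goM, dif_pos hil]
      by_cases hc : (vis >>> i) &&& 1 = 0 ∧ (ds.getD i []).getD 0 0 ≤ f
      · rw [dif_pos hc]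
        have hbit : vis.testBit i = false := (shiftRight_and_one vis i).mp hc.1
        have hreq : reqOf ds i ≤ f := hc.2
        have hf' : f - costOf ds i = k0 - costS ds l (vis ||| 1 <<< i) := by
          rw [costS_or ds l vis i hil hbit]; omega
        have hchild := Hchild (vis ||| 1 <<< i) (f - costOf ds i) memo
          (unvis_lt l i vis hil hc.1) hf' hinv
        obtain ⟨hr0, hrch, hrub, hrinv⟩ := hchild
        set r := dfsM ds l (f - costOf ds i) (vis ||| 1 <<< i) memo with hrdef
        have hb' : 0 ≤ max best (1 + r.1) := le_trans hb (le_max_left _ _)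
        have hch' : Chain ds l f vis (max best (1 + r.1)).toNat := by
          rcases le_total (1 + r.1) best with hle | hle
          · rwa [max_eq_left hle]
          · rw [max_eq_right hle]
            have : (1 + r.1).toNat = r.1.toNat + 1 := by omega
            rw [this]
            exact Chain.cons i hil hbit hreq hrch
        have hrec := ih (i + 1) (max best (1 + r.1)) r.2 (by omega) hrinv hb' hch'
        obtain ⟨g0, gb, gch, ginv, gub⟩ := hrec
        refine ⟨g0, le_trans (le_max_left _ _) gb, gch, ginv, ?_⟩
        intro j n hij hjl hbj hrj hchj
        by_cases hji : j = i
        · subst hji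
          have := hrub n hchj
          calc (n : Int) + 1 ≤ 1 + r.1 := by omega
            _ ≤ max best (1 + r.1) := le_max_right _ _
            _ ≤ _ := gb
        · exact gub j n (by omega) hjl hbj hrj hchj
      · rw [dif_neg hc]
        have hrec := ih (i + 1) best memo (by omega) hinv hb hch
        obtain ⟨g0, gb, gch, ginv, gub⟩ := hrec
        refine ⟨g0, gb, gch, ginv, ?_⟩
        intro j n hij hjl hbj hrj hchj
        by_cases hji : j = i
        · subst hji
          exact absurd ⟨(shiftRight_and_one vis j).mpr hbj, hrj⟩ hc
        · exact gub j n (by omega) hjl hbj hrj hchj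
    · rw [goM, dif_neg hil]
      refine ⟨hb, le_refl _, hch, hinv, ?_⟩
      intro j n hij hjl
      omega

theorem dfsM_spec (ds : List (List Int)) (l : Nat) (k0 : Int) :
    ∀ (u vis : Nat), unvis l vis = u → ∀ (f : Int) (memo : PySem.Dict Nat Int),
      f = k0 - costS ds l vis → ChainInv ds l k0 memo → DfsP ds l k0 f vis memo := by
  intro u
  induction u using Nat.strong_induction_on with
  | _ u ih =>
    intro vis hu f memo hf hinv
    have Hchild : ∀ vis' f' memo', unvis l vis' < unvis l vis →
        f' = k0 - costS ds l vis' → ChainInv ds l k0 memo' → DfsP ds l k0 f' vis' memo' := by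
      intro vis' f' memo' hlt hf' hinv'
      exact ih (unvis l vis') (by omega) vis' rfl f' memo' hf' hinv'
    unfold DfsP
    rw [dfsM]
    cases hget : memo.get? vis with
    | some v =>
      simp only []
      have := hinv vis v hget
      rw [← hf] at this
      exact ⟨this.1, this.2.1, this.2.2, hinv⟩
    | none =>
      simp only []
      have hg := goM_spec ds l k0 vis f hf Hchild l 0 0 memo (by omega) hinv (le_refl 0)
        (Chain.nil f vis)
      obtain ⟨g0, _, gch, ginv, gub⟩ := hg
      set r := goM ds l f vis 0 0 memo with hr
      have hub : ∀ n, Chain ds l f vis n → (n : Int) ≤ r.1 := by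
        intro n hn
        cases hn with
        | nil => exact g0
        | cons i hi hb hreq htl =>
          have := gub i _ (by omega) hi hb hreq htl
          omega
      refine ⟨g0, gch, hub, ?_⟩
      intro m v hmv
      rw [PySem.Dict.get?_insert] at hmv
      by_cases hm : m = vis
      · subst hm
        rw [if_pos rfl] at hmv
        cases hmv
        exact ⟨g0, by rwa [← hf], by rwa [← hf]⟩
      · rw [if_neg hm] at hmv
        exact ginv m v hmv

theorem solution_alt_spec (k : Int) (ds : List (List Int)) :
    0 ≤ solution_alt k ds ∧ Chain ds ds.length k 0 (solution_alt k ds).toNat ∧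
    (∀ n, Chain ds ds.length k 0 n → (n : Int) ≤ solution_alt k ds) := by
  have h := dfsM_spec ds ds.length k (unvis ds.length 0) 0 rfl k PySem.Dict.empty
    (by rw [costS_zero]; ring)
    (by intro m v hmv; rw [PySem.Dict.get?_empty] at hmv; cases hmv)
  exact ⟨h.1, h.2.1, h.2.2.1⟩

-- ---------- A side: characterizing the dp fold ----------

def AReachBy (k : Int) (ds : List (List Int)) (l : Nat) (v m : Nat) : Prop :=
  ∃ p i, i < l ∧ p.testBit i = false ∧ m = p ||| 1 <<< i ∧ p < v ∧ Proc k ds l p ∧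
    reqOf ds i ≤ k - costS ds l p

def DpInv (k : Int) (ds : List (List Int)) (l : Nat) (v : Nat) (dp : List Int) : Prop :=
  dp.length = 2 ^ l ∧ dp.getD 0 0 = k ∧
  ∀ m, m < 2 ^ l → m ≠ 0 →
    (AReachBy k ds l v m → dp.getD m 0 = max (-1) (k - costS ds l m)) ∧
    (¬ AReachBy k ds l v m → dp.getD m 0 = -1)

def AnsInv (k : Int) (ds : List (List Int)) (l : Nat) (v : Nat) (ans : Int) : Prop :=
  0 ≤ ans ∧ (ans = 0 ∨ ∃ m, m < v ∧ Proc k ds l m ∧ ans = (binOnes m : Int)) ∧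
  ∀ m, m < v → Proc k ds l m → (binOnes m : Int) ≤ ans

theorem getD_set' (dp : List Int) (n m : Nat) (x : Int) (hn : n < dp.length) :
    (dp.set n x).getD m 0 = if m = n then x else dp.getD m 0 := by
  by_cases h : m = n
  · subst h
    rw [if_pos rfl]
    simp [List.getD_eq_getElem?_getD, List.getElem?_set_self, hn]
  · rw [if_neg h]
    simp [List.getD_eq_getElem?_getD, List.getElem?_set_ne (fun he => h he.symm)]

theorem Proc_pos_iff (k : Int) (ds : List (List Int)) (l : Nat) (m : Nat) (hm : m ≠ 0) :
    Proc k ds l m ↔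
    (∃ p i, i < l ∧ p.testBit i = false ∧ m = p ||| 1 <<< i ∧ Proc k ds l p ∧
      reqOf ds i ≤ k - costS ds l p) ∧ 0 ≤ k - costS ds l m := by
  constructor
  · intro h
    cases h with
    | zero h => exact absurd rfl hm
    | step i hm' hi hb hr hge =>
      refine ⟨⟨_, i, hi, hb, rfl, hm', hr⟩, ?_⟩
      rw [costS_or ds l _ i hi hb]
      omega
  · rintro ⟨⟨p, i, hi, hb, rfl, hp, hr⟩, hge⟩
    refine Proc.step i hp hi hb hr ?_
    rw [costS_or ds l p i hi hb] at hge
    omega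

-- value of dp[j] at the moment the outer loop reaches j
theorem dp_at (k : Int) (ds : List (List Int)) (l : Nat) (j : Nat) (dp : List Int)
    (hinv : DpInv k ds l j dp) (hj : j < 2 ^ l) :
    (Proc k ds l j → dp.getD j 0 = k - costS ds l j) ∧
    (¬ Proc k ds l j → dp.getD j 0 = -1) := by
  by_cases hj0 : j = 0
  · subst hj0
    rw [costS_zero, hinv.2.1]
    constructor
    · intro _; ring
    · intro hnp
      by_contra hk
      exact hnp (Proc.zero (by intro he; exact hk (by rw [he])))
  · obtain ⟨hc1, hc2⟩ := hinv.2.2 j hj hj0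
    constructor
    · intro hp
      obtain ⟨⟨p, i, hi, hb, he, hpp, hr⟩, hge⟩ := (Proc_pos_iff k ds l j hj0).mp hp
      have hreach : AReachBy k ds l j j := by
        refine ⟨p, i, hi, hb, he, ?_, hpp, hr⟩
        rw [he]; exact lt_or_shift p i hb
      rw [hc1 hreach]
      exact max_eq_right (by omega)
    · intro hnp
      by_cases hreach : AReachBy k ds l j j
      · rw [hc1 hreach]
        have hneg : ¬ (0 ≤ k - costS ds l j) := by
          intro hge
          obtain ⟨p, i, hi, hb, he, _, hpp, hr⟩ := hreach
          exact hnp ((Proc_pos_iff k ds l j hj0).mpr ⟨⟨p, i, hi, hb, he, hpp, hr⟩, hge⟩)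
        exact max_eq_left (by omega)
      · exact hc2 hreach

theorem AReachBy_succ_of_not (k : Int) (ds : List (List Int)) (l : Nat) (j : Nat)
    (hnp : ¬ Proc k ds l j) (m : Nat) :
    AReachBy k ds l (j + 1) m ↔ AReachBy k ds l j m := by
  constructor
  · rintro ⟨p, i, hi, hb, he, hpv, hpp, hr⟩
    rcases Nat.lt_succ_iff_lt_or_eq.mp hpv with h | h
    · exact ⟨p, i, hi, hb, he, h, hpp, hr⟩
    · subst h; exact absurd hpp hnp
  · rintro ⟨p, i, hi, hb, he, hpv, hpp, hr⟩
    exact ⟨p, i, hi, hb, he, by omega, hpp, hr⟩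

-- masks freshly updated while processing mask j, after the first i₀ inner iterations
def NewAt (k : Int) (ds : List (List Int)) (l j i₀ m : Nat) : Prop :=
  ∃ i, i < i₀ ∧ i < l ∧ j.testBit i = false ∧ reqOf ds i ≤ k - costS ds l j ∧
    m = j ||| 1 <<< i

theorem AReachBy_succ_of_proc (k : Int) (ds : List (List Int)) (l : Nat) (j : Nat)
    (hp : Proc k ds l j) (m : Nat) :
    AReachBy k ds l (j + 1) m ↔ AReachBy k ds l j m ∨ NewAt k ds l j l m := by
  constructor
  · rintro ⟨p, i, hi, hb, he, hpv, hpp, hr⟩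
    rcases Nat.lt_succ_iff_lt_or_eq.mp hpv with h | h
    · exact Or.inl ⟨p, i, hi, hb, he, h, hpp, hr⟩
    · subst h; exact Or.inr ⟨i, hi, hi, hb, hr, he⟩
  · rintro (⟨p, i, hi, hb, he, hpv, hpp, hr⟩ | ⟨i, _, hi, hb, hr, he⟩)
    · exact ⟨p, i, hi, hb, he, by omega, hpp, hr⟩
    · exact ⟨j, i, hi, hb, he, by omega, hp, hr⟩

theorem inner_fold (k : Int) (ds : List (List Int)) (l : Nat) (j : Nat) (dp : List Int)
    (hinv : DpInv k ds l j dp) (hp : Proc k ds l j) (hj : j < 2 ^ l) :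
    ∀ i₀, i₀ ≤ l →
      ((List.range i₀).foldl (fun d (i : Nat) => aInner ds (j : Int) d (i : Int)) dp).length = 2 ^ l ∧
      ∀ m, m < 2 ^ l →
        (NewAt k ds l j i₀ m →
          ((List.range i₀).foldl (fun d (i : Nat) => aInner ds (j : Int) d (i : Int)) dp).getD m 0 =
            max (-1) (k - costS ds l m)) ∧
        (¬ NewAt k ds l j i₀ m →
          ((List.range i₀).foldl (fun d (i : Nat) => aInner ds (j : Int) d (i : Int)) dp).getD m 0 =
            dp.getD m 0) := by
  have hdpj : dp.getD j 0 = k - costS ds l j := (dp_at k ds l j dp hinv hj).1 hp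
  intro i₀
  induction i₀ with
  | zero =>
    intro _
    simp only [List.range_zero, List.foldl_nil]
    refine ⟨hinv.1, fun m _ => ⟨?_, fun _ => by simp⟩⟩
    rintro ⟨i, hi0, _⟩
    omega
  | succ i₀ ih =>
    intro hle
    have hil : i₀ < l := by omega
    obtain ⟨hlen, hmain⟩ := ih (by omega)
    set dp' := (List.range i₀).foldl (fun d (i : Nat) => aInner ds (j : Int) d (i : Int)) dp with hdp'
    rw [List.range_succ, List.foldl_append, List.foldl_cons, List.foldl_nil]
    have hnotj : ¬ NewAt k ds l j i₀ j := by
      rintro ⟨i, _, _, hb, _, he⟩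
      have := lt_or_shift j i hb
      omega
    have hdp'j : dp'.getD j 0 = k - costS ds l j := by
      rw [(hmain j hj).2 hnotj, hdpj]
    by_cases hbit : j.testBit i₀ = true
    · have hcond : (j : Int).toNat &&& (1 <<< ((i₀ : Int)).toNat) ≠ 0 := by
        simp only [Int.toNat_natCast]
        intro h0
        rw [(and_shift_eq_zero_iff j i₀).mp h0] at hbit
        exact Bool.false_ne_true hbit
      rw [aInner, if_pos hcond]
      refine ⟨hlen, fun m hm => ⟨?_, ?_⟩⟩
      · rintro ⟨i, hi1, hi2, hb, hr, he⟩
        have hii : i ≠ i₀ := by rintro rfl; rw [hb] at hbit; exact Bool.false_ne_true hbit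
        exact (hmain m hm).1 ⟨i, by omega, hi2, hb, hr, he⟩
      · intro hnot
        refine (hmain m hm).2 ?_
        rintro ⟨i, hi1, hi2, hb, hr, he⟩
        exact hnot ⟨i, by omega, hi2, hb, hr, he⟩
    · have hbF : j.testBit i₀ = false := by
        cases h : j.testBit i₀
        · rfl
        · exact absurd h hbit
      have hcond : ¬ ((j : Int).toNat &&& (1 <<< ((i₀ : Int)).toNat) ≠ 0) := by
        simp only [Int.toNat_natCast]
        intro hne
        exact hne ((and_shift_eq_zero_iff j i₀).mpr hbF)
      rw [aInner, if_neg hcond]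
      have hread : PySem.List.pyGetD dp' (j : Int) 0 = k - costS ds l j := by
        rw [PySem.List.pyGetD_natCast, hdp'j]
      have hreq_eq : PySem.List.pyGetD (PySem.List.pyGetD ds (i₀ : Int) []) 0 0 = reqOf ds i₀ := by
        rw [PySem.List.pyGetD_natCast, PySem.List.pyGetD_zero]
        rfl
      by_cases hreq : k - costS ds l j < reqOf ds i₀
      · rw [if_pos (by rw [hread, hreq_eq]; exact hreq)]
        refine ⟨hlen, fun m hm => ⟨?_, ?_⟩⟩
        · rintro ⟨i, hi1, hi2, hb, hr, he⟩
          have hii : i ≠ i₀ := by rintro rfl; omega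
          exact (hmain m hm).1 ⟨i, by omega, hi2, hb, hr, he⟩
        · intro hnot
          refine (hmain m hm).2 ?_
          rintro ⟨i, hi1, hi2, hb, hr, he⟩
          exact hnot ⟨i, by omega, hi2, hb, hr, he⟩
      · rw [if_neg (by rw [hread, hreq_eq]; exact hreq)]
        have hrle : reqOf ds i₀ ≤ k - costS ds l j := by omega
        set n := j ||| 1 <<< i₀ with hn
        have hcost_eq : PySem.List.pyGetD (PySem.List.pyGetD ds (i₀ : Int) []) 1 0 = costOf ds i₀ := by
          rw [PySem.List.pyGetD_natCast,
            show (1 : Int) = ((1 : Nat) : Int) from rfl, PySem.List.pyGetD_natCast]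
          rfl
        have hfatn : k - costS ds l j - costOf ds i₀ = k - costS ds l n := by
          rw [hn, costS_or ds l j i₀ hil hbF]; ring
        have hnlt : n < 2 ^ l := or_shift_lt j i₀ l hj hil
        have hn0 : n ≠ 0 := or_shift_ne_zero j i₀
        have hnotn : ¬ NewAt k ds l j i₀ n := by
          rintro ⟨i, hi1, hi2, hb, hr, he⟩
          have := or_shift_inj j i i₀ hb hbF he.symm
          omega
        have hdp'n : dp'.getD n 0 = dp.getD n 0 := (hmain n hnlt).2 hnotn
        have hwrite : max (dp'.getD n 0) (k - costS ds l n) = max (-1) (k - costS ds l n) := by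
          rw [hdp'n]
          by_cases hra : AReachBy k ds l j n
          · rw [(hinv.2.2 n hnlt hn0).1 hra, max_assoc, max_self]
          · rw [(hinv.2.2 n hnlt hn0).2 hra]
        have hcast : (((j : Int).toNat ||| 1 <<< ((i₀ : Int)).toNat : Nat) : Int) = ((n : Nat) : Int) := by
          simp only [Int.toNat_natCast, hn]
        rw [hcast, PySem.List.pySetD_natCast, hread, hcost_eq, PySem.List.pyGetD_natCast]
        have hlen' : (dp'.set n (max (dp'.getD n 0) (k - costS ds l j - costOf ds i₀))).length = 2 ^ l := by
          rw [List.length_set, hlen]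
        refine ⟨hlen', fun m hm => ⟨?_, ?_⟩⟩
        · intro hnew
          rw [getD_set' dp' n m _ (by omega)]
          by_cases hmn : m = n
          · rw [if_pos hmn, hfatn, hwrite, hmn]
          · rw [if_neg hmn]
            obtain ⟨i, hi1, hi2, hb, hr, he⟩ := hnew
            have hii : i ≠ i₀ := by
              rintro rfl
              exact hmn (by rw [he])
            exact (hmain m hm).1 ⟨i, by omega, hi2, hb, hr, he⟩
        · intro hnot
          have hmn : m ≠ n := by
            rintro rfl
            exact hnot ⟨i₀, by omega, hil, hbF, hrle, hn⟩
          rw [getD_set' dp' n m _ (by omega), if_neg hmn]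
          refine (hmain m hm).2 ?_
          rintro ⟨i, hi1, hi2, hb, hr, he⟩
          exact hnot ⟨i, by omega, hi2, hb, hr, he⟩

theorem outer_step (k : Int) (ds : List (List Int)) (l : Nat) (j : Nat) (dp : List Int) (ans : Int)
    (hj : j < 2 ^ l) (hinv : DpInv k ds l j dp) (hans : AnsInv k ds l j ans) :
    DpInv k ds l (j + 1) (aOuter ds l (dp, ans) (j : Int)).1 ∧
    AnsInv k ds l (j + 1) (aOuter ds l (dp, ans) (j : Int)).2 := by
  rw [aOuter]
  simp only [PySem.List.pyGetD_natCast]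
  by_cases hp : Proc k ds l j
  · have hvj : dp.getD j 0 = k - costS ds l j := (dp_at k ds l j dp hinv hj).1 hp
    have hne : dp.getD j 0 ≠ -1 := by
      by_cases hj0 : j = 0
      · subst hj0
        rw [hvj, costS_zero]
        have := Proc_k_ne k ds l 0 hp
        omega
      · have := ((Proc_pos_iff k ds l j hj0).mp hp).2
        omega
    rw [if_neg hne]
    simp only [PySem.List.pyRange_zero_natCast, List.foldl_map, Int.toNat_natCast]
    obtain ⟨hlen, hmain⟩ := inner_fold k ds l j dp hinv hp hj l (le_refl l)
    constructor
    · refine ⟨hlen, ?_, ?_⟩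
      · have h0new : ¬ NewAt k ds l j l 0 := by
          rintro ⟨i, _, _, _, _, he⟩
          exact or_shift_ne_zero j i he.symm
        rw [(hmain 0 (Nat.two_pow_pos l)).2 h0new]
        exact hinv.2.1
      · intro m hm hm0
        have hiff := AReachBy_succ_of_proc k ds l j hp m
        constructor
        · intro hra
          rcases hiff.mp hra with h | h
          · by_cases hnew : NewAt k ds l j l m
            · exact (hmain m hm).1 hnew
            · rw [(hmain m hm).2 hnew]
              exact (hinv.2.2 m hm hm0).1 h
          · exact (hmain m hm).1 h
        · intro hra
          have hnew : ¬ NewAt k ds l j l m := fun h => hra (hiff.mpr (Or.inr h))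
          have hold : ¬ AReachBy k ds l j m := fun h => hra (hiff.mpr (Or.inl h))
          rw [(hmain m hm).2 hnew]
          exact (hinv.2.2 m hm hm0).2 hold
    · obtain ⟨h0, hw, hub⟩ := hans
      refine ⟨le_trans h0 (le_max_left _ _), ?_, ?_⟩
      · rcases le_total ((binOnes j : Int)) ans with hle | hle
        · rw [max_eq_left hle]
          rcases hw with h | ⟨m, hm, hpm, he⟩
          · exact Or.inl h
          · exact Or.inr ⟨m, by omega, hpm, he⟩
        · rw [max_eq_right hle]
          exact Or.inr ⟨j, by omega, hp, rfl⟩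
      · intro m hm hpm
        rcases Nat.lt_succ_iff_lt_or_eq.mp hm with h | h
        · exact le_trans (hub m h hpm) (le_max_left _ _)
        · subst h
          exact le_max_right _ _
  · have hvj : dp.getD j 0 = -1 := (dp_at k ds l j dp hinv hj).2 hp
    rw [if_pos hvj]
    constructor
    · refine ⟨hinv.1, hinv.2.1, ?_⟩
      intro m hm hm0
      constructor
      · intro hra
        exact (hinv.2.2 m hm hm0).1 ((AReachBy_succ_of_not k ds l j hp m).mp hra)
      · intro hra
        exact (hinv.2.2 m hm hm0).2 (fun h => hra ((AReachBy_succ_of_not k ds l j hp m).mpr h))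
    · obtain ⟨h0, hw, hub⟩ := hans
      refine ⟨h0, ?_, ?_⟩
      · rcases hw with h | ⟨m, hm, hpm, he⟩
        · exact Or.inl h
        · exact Or.inr ⟨m, by omega, hpm, he⟩
      · intro m hm hpm
        rcases Nat.lt_succ_iff_lt_or_eq.mp hm with h | h
        · exact hub m h hpm
        · subst h; exact absurd hpm hp

theorem solution_spec_A (k : Int) (ds : List (List Int)) :
    (0 ≤ solution k ds) ∧
    (solution k ds = 0 ∨ ∃ m, Proc k ds ds.length m ∧ solution k ds = (binOnes m : Int)) ∧
    (∀ m, Proc k ds ds.length m → (binOnes m : Int) ≤ solution k ds) := by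
  set l := ds.length with hl
  have hsol : solution k ds =
      ((List.range (2 ^ l)).foldl (fun s (i : Nat) => aOuter ds l s (i : Int))
        ((List.replicate (2 ^ l) (-1 : Int)).set 0 k, 0)).2 := by
    rw [solution]
    simp only [Nat.shiftLeft_eq, one_mul, PySem.List.pyRange_zero_natCast, List.foldl_map]
    rw [PySem.List.pySetD_of_nonneg _ _ (by norm_num)]
    rfl
  have hmain : ∀ j, j ≤ 2 ^ l →
      DpInv k ds l j (((List.range j).foldl (fun s (i : Nat) => aOuter ds l s (i : Int))
        ((List.replicate (2 ^ l) (-1 : Int)).set 0 k, 0)).1) ∧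
      AnsInv k ds l j (((List.range j).foldl (fun s (i : Nat) => aOuter ds l s (i : Int))
        ((List.replicate (2 ^ l) (-1 : Int)).set 0 k, 0)).2) := by
    intro j
    induction j with
    | zero =>
      intro _
      simp only [List.range_zero, List.foldl_nil]
      refine ⟨⟨?_, ?_, ?_⟩, le_refl 0, Or.inl rfl, ?_⟩
      · rw [List.length_set, List.length_replicate]
      · rw [getD_set' _ 0 0 k (by rw [List.length_replicate]; exact Nat.two_pow_pos l), if_pos rfl]
      · intro m hm hm0
        constructor
        · rintro ⟨p, i, _, _, _, hp0, _⟩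
          omega
        · intro _
          rw [getD_set' _ 0 m k (by rw [List.length_replicate]; exact Nat.two_pow_pos l), if_neg hm0]
          simp [List.getD_eq_getElem?_getD, List.getElem?_replicate, hm]
      · intro m hm
        omega
    | succ j ih =>
      intro hle
      have hj : j < 2 ^ l := by omega
      obtain ⟨d1, a1⟩ := ih (by omega)
      rw [List.range_succ, List.foldl_append, List.foldl_cons, List.foldl_nil]
      exact outer_step k ds l j _ _ hj d1 a1
  obtain ⟨_, ⟨h0, hw, hub⟩⟩ := hmain (2 ^ l) (le_refl _)
  rw [← hsol] at h0 hw hub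
  refine ⟨h0, ?_, ?_⟩
  · rcases hw with h | ⟨m, _, hpm, he⟩
    · exact Or.inl h
    · exact Or.inr ⟨m, hpm, he⟩
  · intro m hpm
    exact hub m (Proc_lt k ds l m hpm) hpm

-- ---------- bridging the two sides (uses the Pre_ bounds) ----------

theorem Proc_chain_aux (k : Int) (ds : List (List Int)) (l : Nat) (m : Nat)
    (h : Proc k ds l m) :
    ∀ n, Chain ds l (k - costS ds l m) m n → Chain ds l k 0 (binOnes m + n) := by
  induction h with
  | zero h =>
    intro n hc
    rw [costS_zero, sub_zero] at hc
    simpa [binOnes_zero] using hc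
  | step i hm hi hb hr hge ih =>
    rename_i p
    intro n hc
    have hc' : Chain ds l (k - costS ds l p) p (n + 1) := by
      refine Chain.cons i hi hb hr ?_
      have : k - costS ds l p - costOf ds i = k - costS ds l (p ||| 1 <<< i) := by
        rw [costS_or ds l p i hi hb]; ring
      rwa [this]
    have := ih (n + 1) hc'
    rw [binOnes_or l p i (Proc_lt k ds l p hm) hi hb]
    have harr : binOnes p + 1 + n = binOnes p + (n + 1) := by omega
    rwa [harr]

theorem Proc_chain (k : Int) (ds : List (List Int)) (l : Nat) (m : Nat)
    (h : Proc k ds l m) : Chain ds l k 0 (binOnes m) := by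
  have := Proc_chain_aux k ds l m h 0 (Chain.nil _ _)
  simpa using this

-- under the 'no dungeon can raise fatigue above k' hypothesis, every processed mask has
-- nonnegative total cost (so fatigue along the dp never exceeds k)
theorem Proc_costS_nonneg (k : Int) (ds : List (List Int)) (l : Nat)
    (h : ∀ j, j < l → 0 ≤ costOf ds j ∨ k < reqOf ds j) :
    ∀ m, Proc k ds l m → 0 ≤ costS ds l m := by
  intro m hp
  induction hp with
  | zero _ => rw [costS_zero]
  | step i hm hi hb hr hge ih =>
    rw [costS_or ds l _ i hi hb]
    rcases h i hi with hc | hc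
    · omega
    · omega

-- the positive parts of the costs, as a Finset sum
theorem sum_max_eq (ds : List (List Int)) :
    (ds.map (fun d => max (d.getD 1 0) 0)).sum =
      ∑ j ∈ Finset.range ds.length, max (costOf ds j) 0 := by
  induction ds with
  | nil => simp
  | cons d t ih =>
    rw [List.map_cons, List.sum_cons, List.length_cons, Finset.sum_range_succ']
    have h0 : costOf (d :: t) 0 = d.getD 1 0 := rfl
    have hs : ∀ j, costOf (d :: t) (j + 1) = costOf t j := by
      intro j; simp [costOf, List.getD_cons_succ]
    simp only [hs, h0]
    rw [← ih]
    ring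

theorem costS_le_sumPos (ds : List (List Int)) (l : Nat) (m : Nat) :
    costS ds l m ≤ ∑ j ∈ Finset.range l, max (costOf ds j) 0 := by
  apply Finset.sum_le_sum
  intro j _
  by_cases hb : m.testBit j
  · rw [if_pos hb]; exact le_max_left _ _
  · rw [if_neg hb]; exact le_max_right _ _

theorem chain_Proc_aux (k : Int) (ds : List (List Int)) (l : Nat)
    (Hge : ∀ vis i, Proc k ds l vis → i < l → vis.testBit i = false →
      reqOf ds i ≤ k - costS ds l vis → 0 ≤ k - costS ds l vis - costOf ds i) :
    ∀ {f : Int} {vis n : Nat}, Chain ds l f vis n → Proc k ds l vis →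
      f = k - costS ds l vis → ∃ m', Proc k ds l m' ∧ binOnes m' = binOnes vis + n := by
  intro f vis n hch
  induction hch with
  | nil f vis =>
    intro hp _
    exact ⟨vis, hp, by omega⟩
  | cons i hi hb hr htl ih =>
    rename_i f vis n
    intro hp hf
    have hp' : Proc k ds l (vis ||| 1 <<< i) :=
      Proc.step i hp hi hb (by rw [← hf]; exact hr)
        (Hge vis i hp hi hb (by rw [← hf]; exact hr))
    have hf' : f - costOf ds i = k - costS ds l (vis ||| 1 <<< i) := by
      rw [costS_or ds l vis i hi hb, hf]; ring
    obtain ⟨m', hm', heq⟩ := ih hp' hf'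
    refine ⟨m', hm', ?_⟩
    rw [heq, binOnes_or l vis i (Proc_lt k ds l vis hp) hi hb]
    omega

theorem chain_Proc (k : Int) (ds : List (List Int)) (l : Nat)
    (Hge : ∀ vis i, Proc k ds l vis → i < l → vis.testBit i = false →
      reqOf ds i ≤ k - costS ds l vis → 0 ≤ k - costS ds l vis - costOf ds i)
    (hk : k ≠ -1) :
    ∀ n, Chain ds l k 0 n → ∃ m, Proc k ds l m ∧ binOnes m = n := by
  intro n hch
  have := chain_Proc_aux k ds l Hge hch (Proc.zero hk) (by rw [costS_zero]; ring)
  simpa [binOnes_zero] using this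

-- A = B for any start k ≠ -1, given that every dp transition A would want is admissible
theorem AB_of_Hge (k : Int) (ds : List (List Int)) (hk : k ≠ -1)
    (Hge : ∀ vis i, Proc k ds ds.length vis → i < ds.length → vis.testBit i = false →
      reqOf ds i ≤ k - costS ds ds.length vis →
      0 ≤ k - costS ds ds.length vis - costOf ds i) :
    solution k ds = solution_alt k ds := by
  obtain ⟨hA0, hAw, hAub⟩ := solution_spec_A k ds
  obtain ⟨hB0, hBch, hBub⟩ := solution_alt_spec k ds
  apply le_antisymm
  · rcases hAw with h | ⟨m, hm, he⟩
    · rw [h]; exact hB0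
    · rw [he]; exact hBub _ (Proc_chain k ds ds.length m hm)
  · obtain ⟨m, hm, he⟩ := chain_Proc k ds ds.length Hge hk (solution_alt k ds).toNat hBch
    have h1 := hAub m hm
    rw [he, Int.toNat_of_nonneg hB0] at h1
    exact h1

-- A returns 0 whenever k = -1 (dp[0] = -1, so every state is skipped)
theorem solution_of_k_neg_one (k : Int) (ds : List (List Int)) (hk : k = -1) :
    solution k ds = 0 := by
  obtain ⟨_, hw, _⟩ := solution_spec_A k ds
  rcases hw with h | ⟨m, hm, _⟩
  · exact h
  · exact absurd hk (Proc_k_ne k ds ds.length m hm)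

-- no dungeon is enterable at fatigue -1 when every requirement exceeds -1
theorem chain_no_entry (ds : List (List Int)) (l : Nat)
    (h : ∀ i, i < l → -1 < reqOf ds i) :
    ∀ n vis, Chain ds l (-1) vis n → n = 0 := by
  intro n vis hch
  cases hch with
  | nil => rfl
  | cons i hi hb hr htl =>
    have := h i hi
    omega

-- ===== VERDICT (by name: the statement is the Claim_ definition above) =====
theorem solution_spec : Claim_equal_solution := by
  intro k ds _ hpre0
  show solution k ds = solution_alt k ds
  rcases hpre0 with ⟨hk, hreqs⟩ | ⟨hk, hmain⟩ | ⟨hsum, hlen⟩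
  · -- start fatigue exactly -1 with no requirement ≤ -1: both sides return 0
    obtain ⟨hB0, hBch, hBub⟩ := solution_alt_spec k ds
    rw [solution_of_k_neg_one k ds hk]
    have hz := chain_no_entry ds ds.length
      (fun i hi => (hreqs _ (getD_mem_of_lt ds i hi)).2)
      (solution_alt k ds).toNat 0 (by rw [← hk]; exact hBch)
    omega
  · -- well-formed or inert dungeons
    have hpre : PreB k ds ds.length := pre_preB k ds hmain
    refine AB_of_Hge k ds hk ?_
    intro vis i hp hi hb hr
    rcases hpre i hi with h | ⟨hkr, hnn⟩
    · omega
    · have := Proc_costS_nonneg k ds ds.length hnn vis hp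
      omega
  · -- k covers the positive part of all costs: fatigue stays ≥ 0 in any order
    rw [sum_max_eq ds] at hsum
    have hnn : 0 ≤ ∑ j ∈ Finset.range ds.length, max (costOf ds j) 0 :=
      Finset.sum_nonneg fun j _ => le_max_right _ _
    refine AB_of_Hge k ds (by omega) ?_
    intro vis i hp hi hb hr
    have h1 := costS_le_sumPos ds ds.length (vis ||| 1 <<< i)
    rw [costS_or ds ds.length vis i hi hb] at h1
    omega
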